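-- pv_equiv track=rewrite | github.com/ivanpesin/aoc | 2023/2023.13/sol.py | mirrored_at
-- ===== SOURCE A (Python) =====
-- def mirrored_at(cols, v):
--     res = []
--     for c in range(1,cols):
--         if v[c-1] == v[c]:
--             for i in range(1, min(c,cols-c)):
--                 if v[c-1-i] != v[c+i]: break
--             else: res.append(c)
--     return res if res else [0]
-- ===== SOURCE B (Python) =====
-- def mirrored_at(cols, v):
--     # slice-comparison formulation: axis at c is a mirror iff the block left of c
--     # reversed equals the block right of c (within the first `cols` entries)
--     res = [c for c in range(1, cols)
--            if v[c - (m := min(c, cols - c)):c] == v[c:c + m][::-1]]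
--     return res or [0]
-- ===== Notes on version B (the rewrite author's own statement) =====
-- stated objective: idiomatic
-- what changed: B replaces A's nested index loop with for/else-break by a single comprehension that tests each axis with one reversed-slice comparison; the inner Python-level loop disappears.
import Mathlib
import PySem

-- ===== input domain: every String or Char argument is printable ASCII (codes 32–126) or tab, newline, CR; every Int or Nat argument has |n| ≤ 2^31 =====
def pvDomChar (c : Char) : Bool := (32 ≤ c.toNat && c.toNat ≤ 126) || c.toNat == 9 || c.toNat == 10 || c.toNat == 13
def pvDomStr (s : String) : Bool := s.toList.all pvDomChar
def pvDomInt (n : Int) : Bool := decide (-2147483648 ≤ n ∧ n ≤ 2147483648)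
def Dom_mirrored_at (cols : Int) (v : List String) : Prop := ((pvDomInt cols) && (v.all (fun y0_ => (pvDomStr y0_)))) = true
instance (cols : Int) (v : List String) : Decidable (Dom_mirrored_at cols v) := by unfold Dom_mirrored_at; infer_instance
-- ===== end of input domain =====

-- B replaces A's nested index loop with for/else-break by one reversed-slice
-- comparison per candidate axis (objective: idiomatic; same asymptotic cost).

-- ===== PORT A =====
-- inner 'for i in range(1, min(c, cols-c)): if v[c-1-i] != v[c+i]: break' / 'else':
-- returns true iff the loop completes without break
def mirroredAtInner (v : List String) (c : Int) : List Int → Bool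
  | [] => true
  | i :: rest =>
      if PySem.List.pyGet? v (c - 1 - i) ≠ PySem.List.pyGet? v (c + i) then false
      else mirroredAtInner v c rest

def mirrored_at (cols : Int) (v : List String) : List Int :=
  let res := (PySem.List.pyRange 1 cols 1).foldl (fun res c =>
    if PySem.List.pyGet? v (c - 1) = PySem.List.pyGet? v c then
      (if mirroredAtInner v c (PySem.List.pyRange 1 (min c (cols - c)) 1) then res ++ [c]
       else res)
    else res) []
  if res = [] then [0] else res

-- ===== PORT B =====
def mirrored_at_alt (cols : Int) (v : List String) : List Int :=
  let res := (PySem.List.pyRange 1 cols 1).filter (fun c =>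
    let m := min c (cols - c)
    PySem.List.slice v (some (c - m)) (some c) ==
      (PySem.List.slice v (some c) (some (c + m))).reverse)
  if res = [] then [0] else res

-- ===== PRECONDITION & SPEC =====
-- A indexes v up to position cols-1, so it raises IndexError exactly when cols > len(v)
-- and the loop runs (cols ≥ 2); those inputs are excluded.
def Pre_mirrored_at (cols : Int) (v : List String) : Prop :=
  cols ≤ 1 ∨ cols ≤ (v.length : Int)
instance (cols : Int) (v : List String) : Decidable (Pre_mirrored_at cols v) := by
  unfold Pre_mirrored_at; infer_instance
def pvWitness_mirrored_at : Int × List String := (2, ["a", "a"])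

def Spec_mirrored_at (cols : Int) (v : List String) (out : List Int) : Prop := out = mirrored_at_alt cols v
instance (cols : Int) (v : List String) (out : List Int) : Decidable (Spec_mirrored_at cols v out) := by unfold Spec_mirrored_at; infer_instance

-- ===== CLAIM (what is proved, stated in full; the proofs are below) =====
def Claim_equal_mirrored_at : Prop := ∀ (cols : Int) (v : List String), Dom_mirrored_at cols v → Pre_mirrored_at cols v → Spec_mirrored_at cols v (mirrored_at cols v)

-- ===== LEMMAS AND PROOFS =====

-- the inner loop completes without break iff every index in the list matches
theorem mirroredAtInner_eq_true_iff (v : List String) (c : Int) (l : List Int) :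
    mirroredAtInner v c l = true ↔
      ∀ i ∈ l, PySem.List.pyGet? v (c - 1 - i) = PySem.List.pyGet? v (c + i) := by
  induction l with
  | nil => simp [mirroredAtInner]
  | cons i rest ih =>
      simp only [mirroredAtInner, List.mem_cons]
      split_ifs with h
      · simp; intro hcontra; exact absurd hcontra h
      · rw [not_ne_iff] at h
        rw [ih]
        constructor
        · rintro hall j (rfl | hj)
          · exact h
          · exact hall j hj
        · intro hall j hj; exact hall j (Or.inr hj)

-- B's slice comparison is the pointwise mirror condition, for an admissible axis c
theorem slice_eq_iff (v : List String) (cols c : Int)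
    (hc1 : 1 ≤ c) (hc2 : c < cols) (hlen : cols ≤ (v.length : Int)) :
    (PySem.List.slice v (some (c - min c (cols - c))) (some c) =
        (PySem.List.slice v (some c) (some (c + min c (cols - c)))).reverse) ↔
      ∀ i : Int, 0 ≤ i → i < min c (cols - c) →
        PySem.List.pyGet? v (c - 1 - i) = PySem.List.pyGet? v (c + i) := by
  set m := min c (cols - c) with hm
  have hm1 : 1 ≤ m := by omega
  have hmc : m ≤ c := by omega
  have hcm : c + m ≤ (v.length : Int) := by omega
  rw [PySem.List.slice_toNat v (by omega : (0:Int) ≤ c - m) (by omega : (0:Int) ≤ c),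
      PySem.List.slice_toNat v (by omega : (0:Int) ≤ c) (by omega : (0:Int) ≤ c + m)]
  have hlen2 : (List.take ((c + m).toNat - c.toNat) (List.drop c.toNat v)).length = m.toNat := by
    simp; omega
  constructor
  · intro hs i h0 him
    have hget := congrArg (fun l => l[(m - 1 - i).toNat]?) hs
    simp only at hget
    rw [List.getElem?_reverse (by rw [hlen2]; omega), hlen2] at hget
    simp only [List.getElem?_take, List.getElem?_drop] at hget
    rw [if_pos (by omega), if_pos (by omega)] at hget
    rw [PySem.List.pyGet?_of_nonneg v (by omega), PySem.List.pyGet?_of_nonneg v (by omega)]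
    convert hget using 2 <;> omega
  · intro hp
    apply List.ext_getElem?
    intro k
    by_cases hk : k < m.toNat
    · have h := hp (m - 1 - k) (by omega) (by omega)
      rw [PySem.List.pyGet?_of_nonneg v (by omega), PySem.List.pyGet?_of_nonneg v (by omega)] at h
      rw [List.getElem?_reverse (by rw [hlen2]; omega), hlen2]
      simp only [List.getElem?_take, List.getElem?_drop]
      rw [if_pos (by omega), if_pos (by omega)]
      convert h using 2 <;> omega
    · rw [List.getElem?_eq_none (by simp; omega), List.getElem?_eq_none (by simp; omega)]

-- A's candidate test equals B's slice test, for any admissible axis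
theorem mirrored_test_eq (v : List String) (cols c : Int)
    (hc1 : 1 ≤ c) (hc2 : c < cols) (hlen : cols ≤ (v.length : Int)) :
    ((PySem.List.pyGet? v (c - 1) = PySem.List.pyGet? v c) ∧
        mirroredAtInner v c (PySem.List.pyRange 1 (min c (cols - c)) 1) = true) ↔
      (PySem.List.slice v (some (c - min c (cols - c))) (some c) =
        (PySem.List.slice v (some c) (some (c + min c (cols - c)))).reverse) := by
  rw [slice_eq_iff v cols c hc1 hc2 hlen, mirroredAtInner_eq_true_iff]
  constructor
  · rintro ⟨h0, hr⟩ i hi0 him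
    by_cases hi : i = 0
    · subst hi; simpa using h0
    · exact hr i (by rw [PySem.List.mem_pyRange_one]; omega)
  · intro h
    refine ⟨by simpa using h 0 le_rfl (by omega), fun i hi => ?_⟩
    rw [PySem.List.mem_pyRange_one] at hi
    exact h i (by omega) hi.2

-- ===== VERDICT (by name: the statement is the Claim_ definition above) =====
theorem mirrored_at_spec : Claim_equal_mirrored_at := by
  intro cols v _hdom hpre
  unfold Spec_mirrored_at mirrored_at mirrored_at_alt
  rcases hpre with h1 | hlen
  · rw [PySem.List.pyRange_one_eq_nil h1]
    simp
  · have hfold :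
        (PySem.List.pyRange 1 cols 1).foldl (fun res c =>
          if PySem.List.pyGet? v (c - 1) = PySem.List.pyGet? v c then
            (if mirroredAtInner v c (PySem.List.pyRange 1 (min c (cols - c)) 1) then res ++ [c]
             else res)
          else res) [] =
        (PySem.List.pyRange 1 cols 1).filter (fun c =>
          let m := min c (cols - c)
          PySem.List.slice v (some (c - m)) (some c) ==
            (PySem.List.slice v (some c) (some (c + m))).reverse) := by
      rw [PySem.List.foldl_congr_mem _ _
        (fun res c =>
          if (let m := min c (cols - c)
              PySem.List.slice v (some (c - m)) (some c) ==
                (PySem.List.slice v (some c) (some (c + m))).reverse) then res ++ [c] else res) _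
        ?_]
      · exact PySem.List.foldl_append_if_eq_filter _ _ []
      · intro acc c hc
        rw [PySem.List.mem_pyRange_one] at hc
        have hiff := mirrored_test_eq v cols c hc.1 hc.2 hlen
        simp only [beq_iff_eq]
        by_cases hP : PySem.List.pyGet? v (c - 1) = PySem.List.pyGet? v c
        · by_cases hQ : mirroredAtInner v c (PySem.List.pyRange 1 (min c (cols - c)) 1) = true
          · rw [if_pos hP, if_pos hQ, if_pos (hiff.mp ⟨hP, hQ⟩)]
          · rw [if_pos hP, if_neg hQ, if_neg (fun hS => hQ (hiff.mpr hS).2)]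
        · rw [if_neg hP, if_neg (fun hS => hP (hiff.mpr hS).1)]
    rw [hfold]
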